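-- pv_equiv track=rewrite | github.com/uw-bionlp/covid-parser | sdoh/utils/tokenization_nltk.py | find_text_subset
-- ===== SOURCE A (Python) =====
-- def find_text_subset(full, partial):
--
--
--
--     # Get text without white space
--     full_no_ws = "".join(full.split())
--     partial_no_ws = "".join(partial.split())
--
--     # Find partial in full
--     start_no_ws = full_no_ws.find(partial_no_ws)
--     end_no_ws = start_no_ws + len(partial_no_ws)
--     assert start_no_ws >= 0, "Could not find match"
--
--     i_no_ws = 0
--     start_full = -1
--     end_full = -1
--     for i_full, char in enumerate(full):
--
--         # Character is not whitespace
--         if not char.isspace():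
--
--             assert full_no_ws[i_no_ws] == full[i_full], \
--             '''character mismatch {} {}'''.format( \
--             full_no_ws[i_no_ws], full[i_full])
--
--             # Found index of beginning of overlap
--             if i_no_ws == start_no_ws:
--                 start_full = i_full
--
--             # Found index of end of overlap
--             if i_no_ws == end_no_ws:
--                 end_full = i_full
--
--             # Increment non-white space count
--             i_no_ws += 1
--
--     assert start_full >= 0, "could not find start"
--     assert end_full >= 0, "could not find end"
--
--     return (start_full, end_full)
-- ===== SOURCE B (Python) =====
-- def find_text_subset(full, partial):
--     # Direct two-pointer match over the ORIGINAL string, skipping whitespace on the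
--     # fly: no stripped copy of `full`, no str.find, no index table.
--     target = [c for c in partial if not c.isspace()]
--     n = len(full)
--
--     def match_at(i):
--         # Try to match `target` in full[i:], skipping whitespace; on success return
--         # the index of the first non-whitespace character after the match.
--         j = 0
--         while i < n:
--             if full[i].isspace():
--                 i += 1
--             elif j == len(target):
--                 return i
--             elif full[i] == target[j]:
--                 i += 1
--                 j += 1
--             else:
--                 return None
--         return None
--
--     i = 0
--     while i < n:
--         if not full[i].isspace():
--             end = match_at(i)
--             if end is not None:
--                 return (i, end)
--         i += 1
--     assert False, "Could not find match"
-- ===== Notes on version B (the rewrite author's own statement) =====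
-- stated objective: alternative
-- what changed: Instead of building whitespace-stripped copies, calling str.find and replaying a counting loop, B runs a two-pointer substring search directly on the original string, skipping whitespace on the fly, returning the match's start index and the index of the first non-whitespace character after it.
import Mathlib
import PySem

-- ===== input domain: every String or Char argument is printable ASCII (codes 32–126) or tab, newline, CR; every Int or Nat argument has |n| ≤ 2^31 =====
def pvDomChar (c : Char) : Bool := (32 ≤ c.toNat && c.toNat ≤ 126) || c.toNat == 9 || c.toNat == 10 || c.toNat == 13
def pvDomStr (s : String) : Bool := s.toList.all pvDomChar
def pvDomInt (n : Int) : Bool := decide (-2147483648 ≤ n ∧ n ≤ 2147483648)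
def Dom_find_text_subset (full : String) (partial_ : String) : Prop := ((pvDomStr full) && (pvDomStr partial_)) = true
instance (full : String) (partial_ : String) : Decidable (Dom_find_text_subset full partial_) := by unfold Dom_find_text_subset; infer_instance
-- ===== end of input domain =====

-- B abandons A's strip-copy + str.find + counting-loop strategy: it matches partial's
-- non-whitespace characters directly against the ORIGINAL string with an on-the-fly
-- whitespace-skipping two-pointer scan (objective: alternative).


-- ===== PORT A =====
-- Transliteration of A.  The three top-level asserts raise exactly outside Pre_ (excluded);
-- the in-loop character-match assert provably never fires (full_no_ws is the non-whitespace
-- subsequence of full), so it is omitted here.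
def find_text_subset (full : String) (partial_ : String) : Int × Int :=
  let full_no_ws : List Char := PySem.Chars.join [] (PySem.Chars.split₀ full.toList)
  let partial_no_ws : List Char := PySem.Chars.join [] (PySem.Chars.split₀ partial_.toList)
  let start_no_ws : Int := PySem.Chars.find full_no_ws partial_no_ws
  let end_no_ws : Int := start_no_ws + (partial_no_ws.length : Int)
  let r := (PySem.List.enumerate full.toList).foldl
    (fun (acc : Int × Int × Int) (p : Int × Char) =>
      if !PySem.Chars.isspace p.2 then
        (acc.1 + 1,
         (if acc.1 == start_no_ws then p.1 else acc.2.1),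
         (if acc.1 == end_no_ws then p.1 else acc.2.2))
      else acc)
    (0, -1, -1)
  (r.2.1, r.2.2)

-- ===== PORT B =====
-- Transliteration of B.  Each while loop becomes the obvious structural recursion on the
-- remaining suffix of full, carrying the current index i; match_at's pointer j into target
-- becomes consuming the target list.  Python B's final 'assert False' (no match) raises
-- exactly outside Pre_; the port returns (-1, -1) there (excluded by Pre_).
def pvMatchAt : List Char → Int → List Char → Option Int
  | [], _, _ => none
  | c :: r, i, p =>
    if PySem.Chars.isspace c then pvMatchAt r (i + 1) p
    else match p with
      | [] => some i
      | t :: ts => if c == t then pvMatchAt r (i + 1) ts else none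

def pvScan (target : List Char) : List Char → Int → Int × Int
  | [], _ => (-1, -1)
  | c :: r, i =>
    if !PySem.Chars.isspace c then
      match pvMatchAt (c :: r) i target with
      | some e => (i, e)
      | none => pvScan target r (i + 1)
    else pvScan target r (i + 1)

def find_text_subset_alt (full : String) (partial_ : String) : Int × Int :=
  let target : List Char := partial_.toList.filter (fun c => !PySem.Chars.isspace c)
  pvScan target full.toList 0

-- ===== PRECONDITION & SPEC =====
-- Pre_ holds exactly where Python A returns normally: the whitespace-stripped partial occurs
-- in the whitespace-stripped full (else 'Could not find match'), and the match does not end at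
-- the last non-whitespace character (else 'could not find start'/'could not find end' raises).
def Pre_find_text_subset (full : String) (partial_ : String) : Prop :=
  let f := full.toList.filter (fun c => !PySem.Chars.isspace c)
  let p := partial_.toList.filter (fun c => !PySem.Chars.isspace c)
  0 ≤ PySem.Chars.find f p ∧ PySem.Chars.find f p + (p.length : Int) < (f.length : Int)
instance (full : String) (partial_ : String) : Decidable (Pre_find_text_subset full partial_) := by unfold Pre_find_text_subset; infer_instance

def pvWitness_find_text_subset : String × String := ("ab c", "b")

def Spec_find_text_subset (full : String) (partial_ : String) (out : Int × Int) : Prop := out = find_text_subset_alt full partial_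
instance (full : String) (partial_ : String) (out : Int × Int) : Decidable (Spec_find_text_subset full partial_ out) := by unfold Spec_find_text_subset; infer_instance

-- ===== CLAIM (what is proved, stated in full; the proofs are below) =====
def Claim_equal_find_text_subset : Prop := ∀ (full : String) (partial_ : String), Dom_find_text_subset full partial_ → Pre_find_text_subset full partial_ → Spec_find_text_subset full partial_ (find_text_subset full partial_)

-- ===== LEMMAS AND PROOFS =====

-- "".join(l) is l.flatten
theorem pv_join_nil_eq_flatten (l : List (List Char)) : PySem.Chars.join [] l = l.flatten := by
  induction l with
  | nil => rfl
  | cons x l ih =>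
    cases l with
    | nil => simp [PySem.Chars.join, List.intercalate]
    | cons y l =>
      simp only [PySem.Chars.join, List.intercalate, List.intersperse] at ih ⊢
      simp only [List.flatten_cons, ← ih]
      simp

theorem pv_go_flatten (s : List Char) : ∀ (cur : List Char) (acc : List (List Char)),
    (PySem.Chars.split₀.go s cur acc).flatten
      = acc.reverse.flatten ++ cur.reverse ++ s.filter (fun c => !PySem.Chars.isspace c) := by
  induction s with
  | nil =>
    intro cur acc
    simp only [PySem.Chars.split₀.go]
    by_cases h : cur = []
    · simp [h]
    · simp [List.isEmpty_eq_false_iff.mpr h]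
  | cons c s ih =>
    intro cur acc
    simp only [PySem.Chars.split₀.go]
    by_cases hc : PySem.Chars.isspace c
    · by_cases hcur : cur = []
      · simp [hc, hcur, ih]
      · simp [hc, List.isEmpty_eq_false_iff.mpr hcur, ih]
    · simp [hc, ih]

-- "".join(s.split()) is the list of non-whitespace characters of s
theorem pv_join_split₀ (s : List Char) :
    PySem.Chars.join [] (PySem.Chars.split₀ s) = s.filter (fun c => !PySem.Chars.isspace c) := by
  rw [pv_join_nil_eq_flatten, PySem.Chars.split₀, pv_go_flatten]
  simp

-- one non-whitespace step of A's loop, seen through an index table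
theorem pv_pick_step (L : List Int) (i t k st : Int) :
    (if 0 ≤ t - (k + 1) then (L[(t - (k + 1)).toNat]?).getD (if (k == t) = true then i else st)
     else (if (k == t) = true then i else st))
      = (if 0 ≤ t - k then ((i :: L)[(t - k).toNat]?).getD st else st) := by
  rcases lt_trichotomy k t with h | h | h
  · have hbeq : (k == t) = false := by simp; omega
    have htn : (t - k).toNat = (t - (k + 1)).toNat + 1 := by omega
    simp [hbeq, htn]
    split_ifs <;> first | rfl | omega
  · have hbeq : (k == t) = true := by simp [h]
    have htn : (t - k).toNat = 0 := by omega
    simp [hbeq, htn]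
    split_ifs <;> first | rfl | omega
  · have hbeq : (k == t) = false := by simp; omega
    simp [hbeq]
    split_ifs <;> first | rfl | omega

-- the value of A's counting loop, characterised by the table of non-whitespace indices
theorem pv_loop_eq (s e : Int) (l : List (Int × Char)) : ∀ (k st en : Int),
    (l.foldl
      (fun (acc : Int × Int × Int) (p : Int × Char) =>
        if !PySem.Chars.isspace p.2 then
          (acc.1 + 1,
           (if acc.1 == s then p.1 else acc.2.1),
           (if acc.1 == e then p.1 else acc.2.2))
        else acc)
      (k, st, en))
    = (k + (((l.filterMap (fun p => if !PySem.Chars.isspace p.2 then some p.1 else none)).length : Nat) : Int),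
       (if 0 ≤ s - k then (((l.filterMap (fun p => if !PySem.Chars.isspace p.2 then some p.1 else none))[(s - k).toNat]?).getD st) else st),
       (if 0 ≤ e - k then (((l.filterMap (fun p => if !PySem.Chars.isspace p.2 then some p.1 else none))[(e - k).toNat]?).getD en) else en)) := by
  induction l with
  | nil => intro k st en; simp
  | cons p l ih =>
    intro k st en
    by_cases hp : PySem.Chars.isspace p.2
    · have hb : (!PySem.Chars.isspace p.2) = false := by simp [hp]
      simp only [List.foldl_cons, List.filterMap_cons, hb, Bool.false_eq_true, if_false]
      exact ih k st en
    · have hb : (!PySem.Chars.isspace p.2) = true := by simp [hp]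
      simp only [List.foldl_cons, List.filterMap_cons, hb, if_true]
      rw [ih]
      refine Prod.ext ?_ (Prod.ext ?_ ?_)
      · simp only [List.length_cons]; push_cast; ring
      · exact pv_pick_step _ p.1 s k st
      · exact pv_pick_step _ p.1 e k en

-- the enumeration of non-whitespace characters of s with their original indices
def pvNz : List Char → Int → List (Int × Char)
  | [], _ => []
  | c :: r, i => if PySem.Chars.isspace c then pvNz r (i + 1) else (i, c) :: pvNz r (i + 1)

-- B's scan, abstracted to the non-whitespace enumeration
def pvScanP (p : List Char) : List (Int × Char) → Int × Int
  | [] => (-1, -1)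
  | x :: r =>
    match (if p.isPrefixOf ((x :: r).map Prod.snd) then ((x :: r)[p.length]?).map Prod.fst else none) with
    | some e => (x.1, e)
    | none => pvScanP p r

theorem pvScanP_cons (p : List Char) (x : Int × Char) (r : List (Int × Char)) :
    pvScanP p (x :: r)
      = (match (if p.isPrefixOf ((x :: r).map Prod.snd) then ((x :: r)[p.length]?).map Prod.fst else none) with
         | some e => (x.1, e)
         | none => pvScanP p r) := rfl

theorem pv_nz_map_snd (s : List Char) : ∀ i, (pvNz s i).map Prod.snd = s.filter (fun c => !PySem.Chars.isspace c) := by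
  induction s with
  | nil => intro i; rfl
  | cons c r ih =>
    intro i
    by_cases hc : PySem.Chars.isspace c <;> simp [pvNz, hc, ih]

theorem pv_nz_map_fst (s : List Char) : ∀ i,
    (PySem.List.enumerate s i).filterMap (fun p => if !PySem.Chars.isspace p.2 then some p.1 else none)
      = (pvNz s i).map Prod.fst := by
  induction s with
  | nil => intro i; simp [pvNz, PySem.List.enumerate_nil]
  | cons c r ih =>
    intro i
    by_cases hc : PySem.Chars.isspace c <;>
      simpa [PySem.List.enumerate_cons, pvNz, hc] using ih (i + 1)

theorem pv_matchAt_eq (s : List Char) : ∀ (i : Int) (p : List Char),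
    pvMatchAt s i p
      = (if p.isPrefixOf ((pvNz s i).map Prod.snd) then ((pvNz s i)[p.length]?).map Prod.fst else none) := by
  induction s with
  | nil =>
    intro i p
    cases p <;> simp [pvMatchAt, pvNz, List.isPrefixOf]
  | cons c r ih =>
    intro i p
    by_cases hc : PySem.Chars.isspace c
    · simpa [pvMatchAt, pvNz, hc] using ih (i + 1) p
    · cases p with
      | nil => simp [pvMatchAt, pvNz, hc, List.isPrefixOf]
      | cons t ts =>
        by_cases ht : c = t
        · have hbeq : (c == t) = true := by simp [ht]
          have hbeq2 : (t == c) = true := by simp [ht]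
          simp [pvMatchAt, pvNz, hc, hbeq, hbeq2, List.isPrefixOf, ih (i + 1) ts]
        · have hbeq : (c == t) = false := by simp [ht]
          have hbeq2 : (t == c) = false := by simp; exact fun h => ht h.symm
          simp [pvMatchAt, pvNz, hc, hbeq, hbeq2, List.isPrefixOf]

theorem pv_scan_eq (target : List Char) (s : List Char) : ∀ i,
    pvScan target s i = pvScanP target (pvNz s i) := by
  induction s with
  | nil => intro i; rfl
  | cons c r ih =>
    intro i
    by_cases hc : PySem.Chars.isspace c
    · simp [pvScan, pvNz, hc, ih]
    · have hnz : pvNz (c :: r) i = (i, c) :: pvNz r (i + 1) := by simp [pvNz, hc]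
      simp only [pvScan, hc, Bool.not_false, if_true, pv_matchAt_eq (c :: r) i target, hnz, pvScanP]
      cases h : (if target.isPrefixOf (((i, c) :: pvNz r (i + 1)).map Prod.snd)
          then (((i, c) :: pvNz r (i + 1))[target.length]?).map Prod.fst else none) with
      | some e => simp
      | none => simp [ih]

theorem pv_scanP_spec (p : List Char) : ∀ (l : List (Int × Char)) (k : Nat),
    p <+: (l.map Prod.snd).drop k →
    (∀ j < k, ¬ p <+: (l.map Prod.snd).drop j) →
    k + p.length < l.length →
    pvScanP p l = (((l.map Prod.fst)[k]?).getD (-1), ((l.map Prod.fst)[k + p.length]?).getD (-1)) := by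
  intro l
  induction l with
  | nil => intro k _ _ hlen; simp at hlen
  | cons x r ih =>
    intro k hpre hmin hlen
    cases k with
    | zero =>
      have hplen : p.length < (x :: r).length := by simpa using hlen
      have hpref : p.isPrefixOf ((x :: r).map Prod.snd) = true := by
        rw [List.isPrefixOf_iff_prefix]; simpa using hpre
      have hsome : (x :: r)[p.length]? = some ((x :: r)[p.length]'hplen) :=
        List.getElem?_eq_getElem hplen
      have h0 : ((x :: r).map Prod.fst)[(0 : Nat)]? = some x.1 := by
        rw [List.getElem?_map]; rfl
      have h1 : ((x :: r).map Prod.fst)[p.length]? = some (((x :: r)[p.length]'hplen).1) := by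
        rw [List.getElem?_map, hsome]; rfl
      rw [pvScanP_cons]
      simp only [hpref, if_true, hsome, Option.map_some]
      rw [Nat.zero_add, h0, h1]
      rfl
    | succ k =>
      have hnot : ¬ p <+: ((x :: r).map Prod.snd) := by
        simpa using hmin 0 (Nat.succ_pos k)
      have hpref : p.isPrefixOf ((x :: r).map Prod.snd) = false := by
        rw [← Bool.not_eq_true]
        intro h; exact hnot (List.isPrefixOf_iff_prefix.mp h)
      have hrec : pvScanP p (x :: r) = pvScanP p r := by
        rw [pvScanP_cons]; simp only [hpref, Bool.false_eq_true, if_false]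
      rw [hrec, ih k (by simpa using hpre)
          (fun j hj => by simpa using hmin (j + 1) (Nat.succ_lt_succ hj))
          (by have h := hlen; simp only [List.length_cons] at h ⊢; omega)]
      have e1 : ((x :: r).map Prod.fst)[k + 1]? = (r.map Prod.fst)[k]? := by
        rw [List.map_cons, List.getElem?_cons_succ]
      have e2 : ((x :: r).map Prod.fst)[k + 1 + p.length]? = (r.map Prod.fst)[k + p.length]? := by
        rw [List.map_cons, show k + 1 + p.length = (k + p.length) + 1 from by omega,
          List.getElem?_cons_succ]
      rw [e1, e2]

-- ===== VERDICT (by name: the statement is the Claim_ definition above) =====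
theorem find_text_subset_spec : Claim_equal_find_text_subset := by
  intro full partial_ _hdom hpre
  unfold Spec_find_text_subset find_text_subset find_text_subset_alt
  obtain ⟨hs, he⟩ := hpre
  simp only [pv_join_split₀] at *
  set f := full.toList.filter (fun c => !PySem.Chars.isspace c) with hf
  set p := partial_.toList.filter (fun c => !PySem.Chars.isspace c) with hp
  set s := PySem.Chars.find f p with hsdef
  rw [pv_loop_eq]
  have hnzsnd := pv_nz_map_snd full.toList 0
  have hnzfst := pv_nz_map_fst full.toList 0
  have hnzlen : (pvNz full.toList 0).length = f.length := by
    have := congrArg List.length hnzsnd; simpa using this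
  have hspec := PySem.Chars.find_spec (s := f) (sub := p) hs
  have hlen : s.toNat + p.length < (pvNz full.toList 0).length := by
    rw [hnzlen]; omega
  have hB : pvScan p full.toList 0
      = ((((pvNz full.toList 0).map Prod.fst)[s.toNat]?).getD (-1),
         (((pvNz full.toList 0).map Prod.fst)[s.toNat + p.length]?).getD (-1)) := by
    rw [pv_scan_eq]
    exact pv_scanP_spec p (pvNz full.toList 0) s.toNat
      (by rw [hnzsnd]; exact hspec.1)
      (fun j hj => by rw [hnzsnd]; exact hspec.2 j hj)
      hlen
  have he0 : (0:Int) ≤ s + (p.length : Int) := by have := Int.natCast_nonneg p.length; omega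
  have htn : (s + (p.length : Int)).toNat = s.toNat + p.length := by omega
  simp only [sub_zero, if_pos hs, if_pos he0, hnzfst, htn]
  exact hB.symm
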